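-- pv_equiv track=rewrite | github.com/sdanil-ops/stepik-bioinformatics-python | 2.6/task-2.py | get_increasing_sequence
-- ===== SOURCE A (Python) =====
-- def get_increasing_sequence(length: int)-> str:
--     sequence = []
--     for i in range(1, length + 1):
--         for j in range(i):
--             sequence.append(i)
--             if len(sequence) == length:
--                 break
--         else:
--             continue
--         break
--
--     return sequence
-- ===== SOURCE B (Python) =====
-- import math
--
--
-- def get_increasing_sequence(length: int) -> list:
--     # Element at 1-based position n is the smallest i with i*(i+1)/2 >= n,
--     # computed in closed form as (isqrt(8n-7)+1)//2 (triangular-number inverse).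
--     return [(math.isqrt(8 * n - 7) + 1) // 2 for n in range(1, length + 1)]
-- ===== Notes on version B (the rewrite author's own statement) =====
-- stated objective: idiomatic
-- what changed: Replaces A's nested append loop with break/else control flow by a single list comprehension computing each element directly from its position via the integer triangular-number inverse (isqrt(8n-7)+1)//2.
import Mathlib
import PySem

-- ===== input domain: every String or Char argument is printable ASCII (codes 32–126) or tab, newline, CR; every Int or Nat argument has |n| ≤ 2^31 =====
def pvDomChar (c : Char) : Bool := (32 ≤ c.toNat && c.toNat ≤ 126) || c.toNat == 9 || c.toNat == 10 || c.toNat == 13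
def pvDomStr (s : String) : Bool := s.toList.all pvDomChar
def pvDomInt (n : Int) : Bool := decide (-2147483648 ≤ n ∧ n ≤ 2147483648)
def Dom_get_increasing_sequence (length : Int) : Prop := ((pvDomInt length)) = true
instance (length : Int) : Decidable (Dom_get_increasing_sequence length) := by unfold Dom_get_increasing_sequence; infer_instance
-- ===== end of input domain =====

-- B replaces A's nested append loop (with break/else) by a per-position closed form
-- (the integer triangular-number inverse); objective: idiomatic, same cost.

-- ===== PORT A =====
-- inner 'for j in range(i): sequence.append(i); if len(sequence) == length: break'
-- returns (sequence, broke?)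
def pvInnerA (js : List Int) (i len : Int) (seq : List Int) : List Int × Bool :=
  match js with
  | [] => (seq, false)
  | _ :: rest =>
    let seq' := seq ++ [i]
    if (seq'.length : Int) = len then (seq', true) else pvInnerA rest i len seq'

-- outer 'for i in range(1, length + 1): … else: continue; break'
def pvOuterA (is : List Int) (len : Int) (seq : List Int) : List Int :=
  match is with
  | [] => seq
  | i :: rest =>
    let r := pvInnerA (PySem.List.pyRange 0 i 1) i len seq
    if r.2 then r.1 else pvOuterA rest len r.1

def get_increasing_sequence (length : Int) : List Int :=
  pvOuterA (PySem.List.pyRange 1 (length + 1) 1) length []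

-- ===== PORT B =====
-- (math.isqrt(8*n-7) + 1) // 2 ; math.isqrt ported as Nat.sqrt (argument ≥ 1 on every n used)
def pvInvTri (n : Int) : Int :=
  PySem.Int.floordiv (((8 * n - 7).toNat.sqrt : Int) + 1) 2

def get_increasing_sequence_alt (length : Int) : List Int :=
  (PySem.List.pyRange 1 (length + 1) 1).map pvInvTri

-- ===== PRECONDITION & SPEC =====
def Spec_get_increasing_sequence (length : Int) (out : List Int) : Prop := out = get_increasing_sequence_alt length
instance (length : Int) (out : List Int) : Decidable (Spec_get_increasing_sequence length out) := by unfold Spec_get_increasing_sequence; infer_instance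

-- ===== CLAIM (what is proved, stated in full; the proofs are below) =====
def Claim_equal_get_increasing_sequence : Prop := ∀ (length : Int), Dom_get_increasing_sequence length → Spec_get_increasing_sequence length (get_increasing_sequence length)

-- ===== LEMMAS AND PROOFS =====

-- closed form: for T(i-1) < n ≤ T(i) (stated doubled to avoid division), pvInvTri n = i
theorem pvInvTri_eq (i n : Int) (hi : 1 ≤ i)
    (h1 : i * (i - 1) < 2 * n) (h2 : 2 * n ≤ i * (i + 1)) : pvInvTri n = i := by
  -- parity: i*(i-1) is even, so i*(i-1) + 2 ≤ 2*n
  obtain ⟨t, ht⟩ := Int.even_mul_succ_self (i - 1)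
  have ht' : i * (i - 1) = t + t := by rw [← ht]; ring
  have h1t : t + t < 2 * n := ht' ▸ h1
  have hpar : i * (i - 1) + 2 ≤ 2 * n := by rw [ht']; omega
  have hn : 1 ≤ n := by nlinarith
  have hm : ((8 * n - 7).toNat : Int) = 8 * n - 7 := Int.toNat_of_nonneg (by omega)
  set m := (8 * n - 7).toNat with hmdef
  set k := i.toNat with hkdef
  have hk : (k : Int) = i := by omega
  have h1' : ((2 * k - 1 : Nat) : Int) = 2 * i - 1 := by omega
  have h2' : ((2 * k + 1 : Nat) : Int) = 2 * i + 1 := by omega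
  have hlow : (2 * k - 1) * (2 * k - 1) ≤ m := by
    have hI : (((2 * k - 1) * (2 * k - 1) : Nat) : Int) ≤ (m : Int) := by
      rw [Nat.cast_mul, h1', hm]; nlinarith
    exact_mod_cast hI
  have hhigh : m < (2 * k + 1) * (2 * k + 1) := by
    have hI : (m : Int) < (((2 * k + 1) * (2 * k + 1) : Nat) : Int) := by
      rw [Nat.cast_mul, h2', hm]; nlinarith
    exact_mod_cast hI
  have hs1 : 2 * k - 1 ≤ m.sqrt := Nat.le_sqrt.mpr hlow
  have hs2 : m.sqrt < 2 * k + 1 := Nat.sqrt_lt.mpr hhigh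
  unfold pvInvTri
  simp only [← hmdef]
  rw [PySem.Int.floordiv_eq_iff_of_pos (by omega)]
  omega

-- the inner loop appends min(js.length, len - seq.length) copies of i and reports
-- whether the target length was reached
theorem pvInnerA_spec (js : List Int) (i len : Int) :
    ∀ seq : List Int, (seq.length : Int) < len →
      pvInnerA js i len seq =
        if ((seq.length : Int) + (js.length : Int) < len)
        then (seq ++ List.replicate js.length i, false)
        else (seq ++ List.replicate (len - (seq.length : Int)).toNat i, true) := by
  induction js with
  | nil =>
    intro seq h
    rw [if_pos (by simpa using h)]
    simp [pvInnerA]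
  | cons j rest ih =>
    intro seq h
    have hlc : ((seq ++ [i]).length : Int) = (seq.length : Int) + 1 := by simp
    have hrl : (((j :: rest)).length : Int) = (rest.length : Int) + 1 := by simp
    by_cases hb : ((seq ++ [i]).length : Int) = len
    · simp only [pvInnerA]
      rw [if_pos hb, if_neg (by omega)]
      have h1 : (len - (seq.length : Int)).toNat = 1 := by omega
      rw [h1]
      simp
    · simp only [pvInnerA]
      rw [if_neg hb, ih (seq ++ [i]) (by omega)]
      by_cases hc : ((seq.length : Int) + (((j :: rest)).length : Int) < len)
      · rw [if_pos (by rw [hlc]; omega), if_pos hc]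
        simp [List.replicate_succ, List.append_assoc]
      · rw [if_neg (by rw [hlc]; omega), if_neg hc]
        have hT : (len - ((seq ++ [i]).length : Int)).toNat + 1 = (len - (seq.length : Int)).toNat := by
          omega
        rw [← hT]
        simp [List.replicate_succ, List.append_assoc]

theorem pvInnerA_cont (js : List Int) (i len : Int) (seq : List Int)
    (h : (seq.length : Int) < len) (hc : ((seq.length : Int) + (js.length : Int) < len)) :
    pvInnerA js i len seq = (seq ++ List.replicate js.length i, false) := by
  rw [pvInnerA_spec js i len seq h, if_pos hc]

theorem pvInnerA_break (js : List Int) (i len : Int) (seq : List Int)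
    (h : (seq.length : Int) < len) (hc : ¬((seq.length : Int) + (js.length : Int) < len)) :
    pvInnerA js i len seq = (seq ++ List.replicate (len - (seq.length : Int)).toNat i, true) := by
  rw [pvInnerA_spec js i len seq h, if_neg hc]

-- a map over a range on which f is constant is a replicate
theorem map_pyRange_const (f : Int → Int) (c : Int) :
    ∀ (k : Nat) (a b : Int), (b - a).toNat = k →
      (∀ n, a ≤ n → n < b → f n = c) →
      (PySem.List.pyRange a b 1).map f = List.replicate k c := by
  intro k
  induction k with
  | zero =>
    intro a b hk _
    rw [PySem.List.pyRange_one_eq_nil (by omega)]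
    simp
  | succ k ih =>
    intro a b hk hf
    rw [PySem.List.pyRange_one_cons (by omega)]
    simp only [List.map_cons, List.replicate_succ]
    rw [hf a le_rfl (by omega), ih (a + 1) b (by omega) (fun n h1 h2 => hf n (by omega) h2)]

-- for 1 ≤ i, 2*(i-1) ≤ (i-1)*i  (used to bound i by the accumulated length)
theorem pv_two_sub_one_le (i : Int) (hi : 1 ≤ i) : 2 * (i - 1) ≤ (i - 1) * i := by
  rcases eq_or_lt_of_le hi with h | h
  · simp [← h]
  · nlinarith [mul_nonneg (by omega : (0:Int) ≤ i - 1) (by omega : (0:Int) ≤ i - 2)]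

-- outer-loop invariant: seq holds the first T(i-1) elements of the answer
theorem pvOuterA_spec :
    ∀ (k : Nat) (i len : Int) (seq : List Int),
      1 ≤ i → (len + 1 - i).toNat ≤ k →
      2 * (seq.length : Int) = (i - 1) * i →
      (seq.length : Int) < len →
      seq = (PySem.List.pyRange 1 ((seq.length : Int) + 1) 1).map pvInvTri →
      pvOuterA (PySem.List.pyRange i (len + 1) 1) len seq =
        (PySem.List.pyRange 1 (len + 1) 1).map pvInvTri := by
  intro k
  induction k with
  | zero =>
    intro i len seq hi hk hlen hlt _
    exfalso
    have h2i := pv_two_sub_one_le i hi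
    have : i - 1 ≤ (seq.length : Int) := by linarith
    omega
  | succ k ih =>
    intro i len seq hi hk hlen hlt hseq
    have h2i := pv_two_sub_one_le i hi
    have hile : i ≤ len := by
      have : i - 1 ≤ (seq.length : Int) := by linarith
      omega
    have hjs : (((PySem.List.pyRange 0 i 1).length) : Int) = i := by
      rw [PySem.List.length_pyRange_one]; omega
    rw [PySem.List.pyRange_one_cons (by omega)]
    simp only [pvOuterA]
    by_cases hc : ((seq.length : Int) + (((PySem.List.pyRange 0 i 1)).length : Int) < len)
    · -- block i fits strictly: loop continues with i + 1
      rw [pvInnerA_cont _ _ _ _ hlt hc]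
      show pvOuterA (PySem.List.pyRange (i + 1) (len + 1) 1) len
          (seq ++ List.replicate (PySem.List.pyRange 0 i 1).length i) = _
      have hnewlen : (((seq ++ List.replicate (PySem.List.pyRange 0 i 1).length i)).length : Int)
          = (seq.length : Int) + i := by
        simp only [List.length_append, List.length_replicate, Nat.cast_add]
        omega
      have hrep : (PySem.List.pyRange ((seq.length : Int) + 1) ((seq.length : Int) + i + 1) 1).map pvInvTri
          = List.replicate (PySem.List.pyRange 0 i 1).length i := by
        apply map_pyRange_const _ _ _ _ _ (by omega)
        intro n h1 h2
        apply pvInvTri_eq i n hi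
        · nlinarith
        · nlinarith
      apply ih (i + 1) len _ (by omega) (by omega)
      · rw [hnewlen]; ring_nf; ring_nf at hlen; linarith
      · rw [hnewlen]; omega
      · rw [hnewlen,
            PySem.List.pyRange_one_append 1 ((seq.length : Int) + 1) ((seq.length : Int) + i + 1) (by omega) (by omega),
            List.map_append, ← hseq, hrep]
    · -- block i reaches the target length: the loop breaks with the final sequence
      rw [pvInnerA_break _ _ _ _ hlt hc]
      show seq ++ List.replicate (len - (seq.length : Int)).toNat i = _
      rw [PySem.List.pyRange_one_append 1 ((seq.length : Int) + 1) (len + 1) (by omega) (by omega),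
          List.map_append, ← hseq]
      congr 1
      symm
      apply map_pyRange_const _ _ _ _ _ (by omega)
      intro n h1 h2
      apply pvInvTri_eq i n hi
      · nlinarith
      · nlinarith

-- ===== VERDICT (by name: the statement is the Claim_ definition above) =====
theorem get_increasing_sequence_spec : Claim_equal_get_increasing_sequence := by
  intro length _
  unfold Spec_get_increasing_sequence get_increasing_sequence get_increasing_sequence_alt
  by_cases h : length ≤ 0
  · rw [PySem.List.pyRange_one_eq_nil (by omega)]
    simp [pvOuterA]
  · exact pvOuterA_spec length.toNat 1 length [] (by omega) (by omega) (by simp)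
      (by simp; omega) (by simp [PySem.List.pyRange_one_eq_nil])
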